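-- pv_equiv track=rewrite | github.com/Gastd/ga-hls | replication/scripts/migrate_effectiveness_v1_to_v2.py | choose_quant_pos
-- ===== SOURCE A (Python) =====
-- from typing import Dict, List, Tuple, Optional
--
-- def choose_quant_pos(quant_nodes: List[Tuple[int,str]], domain: List[str], used: set) -> Tuple[int,str]:
--     # Prefer ForAll positions first when flipping ForAll/Exists (matches CC3 intent)
--     order = []
--     for p,t in quant_nodes:
--         if p in used: continue
--         order.append((0 if t=="ForAll" else 1, p, t))
--     if not order:
--         # fallback: allow reuse
--         for p,t in quant_nodes:
--             order.append((0 if t=="ForAll" else 1, p, t))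
--     order.sort()
--     return order[0][1], f"prefer-ForAll({order[0][2]})"
-- ===== SOURCE B (Python) =====
-- from typing import List, Tuple
--
-- def choose_quant_pos(quant_nodes: List[Tuple[int, str]], domain: List[str], used: set) -> Tuple[int, str]:
--     # Single-pass running-minimum selection; no intermediate list, no sort.
--     best = None
--     for p, t in quant_nodes:
--         if p in used:
--             continue
--         k = (0 if t == "ForAll" else 1, p, t)
--         if best is None or k < best:
--             best = k
--     if best is None:
--         # fallback: allow reuse
--         for p, t in quant_nodes:
--             k = (0 if t == "ForAll" else 1, p, t)
--             if best is None or k < best: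
--                 best = k
--     return best[1], f"prefer-ForAll({best[2]})"
-- ===== Notes on version B (the rewrite author's own statement) =====
-- stated objective: alternative
-- what changed: Replaced A's build-key-list + stable sort + take-first with a single-pass running-minimum selection over the nodes (with the same reuse fallback scan); no intermediate list is built or sorted.
-- outside the precondition, e.g. on choose_quant_pos([], [], set()): A raises IndexError, B raises TypeError
import Mathlib
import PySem

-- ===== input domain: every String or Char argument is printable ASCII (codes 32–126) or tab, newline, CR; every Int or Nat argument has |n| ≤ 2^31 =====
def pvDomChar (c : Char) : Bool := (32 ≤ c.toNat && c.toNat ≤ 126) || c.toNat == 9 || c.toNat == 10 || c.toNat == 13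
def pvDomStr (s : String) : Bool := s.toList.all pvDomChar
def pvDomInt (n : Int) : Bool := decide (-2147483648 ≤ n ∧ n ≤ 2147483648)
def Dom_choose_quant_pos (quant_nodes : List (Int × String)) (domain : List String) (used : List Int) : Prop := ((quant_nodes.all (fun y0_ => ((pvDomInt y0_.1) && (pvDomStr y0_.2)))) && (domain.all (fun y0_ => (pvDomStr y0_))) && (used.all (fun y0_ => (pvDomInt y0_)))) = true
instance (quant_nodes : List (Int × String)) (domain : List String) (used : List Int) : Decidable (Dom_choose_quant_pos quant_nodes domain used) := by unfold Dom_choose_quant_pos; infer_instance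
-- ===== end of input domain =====

-- B replaces A's build-list + full sort + take-first by a single-pass running minimum (same reuse fallback).

-- Python lexicographic '<' on the key triples (0/1, p, t); exact: Int and String '<' match Python's on the domain.
def pvLt3 (a b : Int × Int × String) : Bool :=
  decide (a.1 < b.1) || (decide (a.1 = b.1) && (decide (a.2.1 < b.2.1) || (decide (a.2.1 = b.2.1) && decide (a.2.2 < b.2.2))))

def pvKey (pt : Int × String) : Int × Int × String :=
  ((if pt.2 == "ForAll" then (0 : Int) else 1), pt.1, pt.2)

-- ===== PORT A =====
-- hand port of Python's list.sort() on these triples as a stable insertion sort; exact: pvLt3 is a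
-- total strict order in which fully tied triples are equal, so stability cannot change the result.
def pvInsert (x : Int × Int × String) : List (Int × Int × String) → List (Int × Int × String)
  | [] => [x]
  | y :: ys => if pvLt3 x y then x :: y :: ys else y :: pvInsert x ys

def pvIsort : List (Int × Int × String) → List (Int × Int × String)
  | [] => []
  | x :: xs => pvInsert x (pvIsort xs)

def choose_quant_pos (quant_nodes : List (Int × String)) (domain : List String) (used : List Int) : Int × String :=
  let order := quant_nodes.foldl (fun acc pt => if used.contains pt.1 then acc else acc ++ [pvKey pt]) []
  let order := if order = [] then quant_nodes.foldl (fun acc pt => acc ++ [pvKey pt]) [] else order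
  match pvIsort order with
  | [] => (0, "")   -- unreachable under Pre_ (quant_nodes ≠ []); Python raises IndexError here
  | b :: _ => (b.2.1, "prefer-ForAll(" ++ b.2.2 ++ ")")

-- ===== PORT B =====
def pvStep (best : Option (Int × Int × String)) (k : Int × Int × String) : Option (Int × Int × String) :=
  match best with
  | none => some k
  | some b => if pvLt3 k b then some k else some b

def choose_quant_pos_alt (quant_nodes : List (Int × String)) (domain : List String) (used : List Int) : Int × String :=
  let best := quant_nodes.foldl (fun best pt => if used.contains pt.1 then best else pvStep best (pvKey pt)) none
  let best := match best with
    | none => quant_nodes.foldl (fun b pt => pvStep b (pvKey pt)) none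
    | some b => some b
  match best with
  | none => (0, "")   -- unreachable under Pre_ (quant_nodes ≠ []); Python raises TypeError here
  | some b => (b.2.1, "prefer-ForAll(" ++ b.2.2 ++ ")")

-- ===== PRECONDITION & SPEC =====
-- Pre_ excludes only the empty quant_nodes list, on which Python A raises IndexError.
def Pre_choose_quant_pos (quant_nodes : List (Int × String)) (domain : List String) (used : List Int) : Prop :=
  quant_nodes ≠ []
instance (quant_nodes : List (Int × String)) (domain : List String) (used : List Int) : Decidable (Pre_choose_quant_pos quant_nodes domain used) := by unfold Pre_choose_quant_pos; infer_instance

def pvWitness_choose_quant_pos : (List (Int × String)) × List String × List Int := ([(1, "ForAll"), (2, "Exists")], [], [])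

def Spec_choose_quant_pos (quant_nodes : List (Int × String)) (domain : List String) (used : List Int) (out : Int × String) : Prop := out = choose_quant_pos_alt quant_nodes domain used
instance (quant_nodes : List (Int × String)) (domain : List String) (used : List Int) (out : Int × String) : Decidable (Spec_choose_quant_pos quant_nodes domain used out) := by unfold Spec_choose_quant_pos; infer_instance

-- ===== CLAIM (what is proved, stated in full; the proofs are below) =====
def Claim_equal_choose_quant_pos : Prop := ∀ (quant_nodes : List (Int × String)) (domain : List String) (used : List Int), Dom_choose_quant_pos quant_nodes domain used → Pre_choose_quant_pos quant_nodes domain used → Spec_choose_quant_pos quant_nodes domain used (choose_quant_pos quant_nodes domain used)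

-- ===== LEMMAS AND PROOFS =====

theorem pvLt3_eq_true_iff (a b : Int × Int × String) : pvLt3 a b = true ↔
    (a.1 < b.1 ∨ (a.1 = b.1 ∧ (a.2.1 < b.2.1 ∨ (a.2.1 = b.2.1 ∧ a.2.2 < b.2.2)))) := by
  simp only [pvLt3, Bool.or_eq_true, Bool.and_eq_true, decide_eq_true_eq]

theorem pvLt3_eq_false_iff (a b : Int × Int × String) : pvLt3 a b = false ↔
    ¬ (a.1 < b.1 ∨ (a.1 = b.1 ∧ (a.2.1 < b.2.1 ∨ (a.2.1 = b.2.1 ∧ a.2.2 < b.2.2)))) := by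
  rw [← pvLt3_eq_true_iff]
  exact ⟨fun h => by simp [h], fun h => by simpa using h⟩

theorem pvLt3_irrefl (a : Int × Int × String) : pvLt3 a a = false := by
  rw [pvLt3_eq_false_iff]
  simp [lt_irrefl]

theorem pvLt3_antisymm {a b : Int × Int × String} (h1 : pvLt3 a b = false) (h2 : pvLt3 b a = false) : a = b := by
  rw [pvLt3_eq_false_iff] at h1 h2
  push_neg at h1 h2
  obtain ⟨a1, a2, a3⟩ := a
  obtain ⟨b1, b2, b3⟩ := b
  simp only at h1 h2
  have e1 : a1 = b1 := le_antisymm h2.1 h1.1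
  have h1' := h1.2 e1
  have h2' := h2.2 e1.symm
  have e2 : a2 = b2 := le_antisymm h2'.1 h1'.1
  have e3 : a3 = b3 := le_antisymm (h2'.2 e2.symm) (h1'.2 e2)
  simp [e1, e2, e3]

theorem pvLt3_trans {a b c : Int × Int × String} (h1 : pvLt3 a b = true) (h2 : pvLt3 b c = true) : pvLt3 a c = true := by
  rw [pvLt3_eq_true_iff] at h1 h2 ⊢
  obtain ⟨a1, a2, a3⟩ := a
  obtain ⟨b1, b2, b3⟩ := b
  obtain ⟨c1, c2, c3⟩ := c
  simp only at h1 h2 ⊢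
  rcases h1 with h1 | ⟨e1, h1⟩ <;> rcases h2 with h2 | ⟨e2, h2⟩
  · exact Or.inl (lt_trans h1 h2)
  · exact Or.inl (e2 ▸ h1)
  · exact Or.inl (e1 ▸ h2)
  · refine Or.inr ⟨e1.trans e2, ?_⟩
    rcases h1 with h1 | ⟨f1, h1⟩ <;> rcases h2 with h2 | ⟨f2, h2⟩
    · exact Or.inl (lt_trans h1 h2)
    · exact Or.inl (f2 ▸ h1)
    · exact Or.inl (f1 ▸ h2)
    · exact Or.inr ⟨f1.trans f2, lt_trans h1 h2⟩

-- "m is the minimum of ks" in the strict order pvLt3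
def pvIsMin (m : Int × Int × String) (ks : List (Int × Int × String)) : Prop :=
  m ∈ ks ∧ ∀ y ∈ ks, pvLt3 y m = false

theorem pvIsMin_unique {m1 m2 : Int × Int × String} {ks : List (Int × Int × String)}
    (h1 : pvIsMin m1 ks) (h2 : pvIsMin m2 ks) : m1 = m2 :=
  pvLt3_antisymm (h2.2 m1 h1.1) (h1.2 m2 h2.1)

theorem pvIsort_head (ks : List (Int × Int × String)) :
    ks ≠ [] → ∃ m t, pvIsort ks = m :: t ∧ pvIsMin m ks := by
  induction ks with
  | nil => intro h; exact absurd rfl h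
  | cons x xs ih =>
    intro _
    by_cases hxs : xs = []
    · subst hxs
      exact ⟨x, [], rfl, List.mem_singleton.mpr rfl, by
        intro y hy; rw [List.mem_singleton] at hy; rw [hy]; exact pvLt3_irrefl x⟩
    · obtain ⟨h0, t0, hsort, hmem, hmin⟩ := ih hxs
      show ∃ m t, pvInsert x (pvIsort xs) = m :: t ∧ _
      rw [hsort]
      by_cases hlt : pvLt3 x h0 = true
      · refine ⟨x, h0 :: t0, by simp [pvInsert, hlt], List.mem_cons_self, ?_⟩
        intro y hy
        rcases List.mem_cons.mp hy with hyx | hy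
        · rw [hyx]; exact pvLt3_irrefl x
        · by_contra hc
          have := pvLt3_trans (Bool.of_not_eq_false hc) hlt
          rw [hmin y hy] at this; exact Bool.false_ne_true this
      · refine ⟨h0, pvInsert x t0, by simp [pvInsert, Bool.of_not_eq_true hlt], List.mem_cons_of_mem _ hmem, ?_⟩
        intro y hy
        rcases List.mem_cons.mp hy with hyx | hy
        · rw [hyx]; exact Bool.of_not_eq_true hlt
        · exact hmin y hy

def pvMin2 (b k : Int × Int × String) : Int × Int × String := if pvLt3 k b then k else b

theorem pvFoldlMin2_isMin (ks : List (Int × Int × String)) :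
    ∀ b, pvIsMin (ks.foldl pvMin2 b) (b :: ks) := by
  induction ks with
  | nil =>
    intro b
    exact ⟨List.mem_singleton.mpr rfl, by
      intro y hy; rw [List.mem_singleton] at hy; rw [hy]; exact pvLt3_irrefl b⟩
  | cons k ks ih =>
    intro b
    rw [List.foldl_cons]
    obtain ⟨hmem, hmin⟩ := ih (pvMin2 b k)
    generalize hg : ks.foldl pvMin2 (pvMin2 b k) = m0 at hmem hmin ⊢
    have hm2 : pvMin2 b k = k ∨ pvMin2 b k = b := by
      unfold pvMin2; split <;> simp
    constructor
    · rcases List.mem_cons.mp hmem with he | hm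
      · rcases hm2 with h | h <;> rw [he, h] <;> simp
      · simp [hm]
    · intro y hy
      rcases List.mem_cons.mp hy with hyb | hy
      · -- y = b
        rw [hyb]
        by_cases hlt : pvLt3 k b = true
        · have ek : pvMin2 b k = k := by simp [pvMin2, hlt]
          have hkm : pvLt3 k m0 = false :=
            hmin k (by rw [ek]; exact List.mem_cons_self)
          by_contra hc
          have := pvLt3_trans hlt (Bool.of_not_eq_false hc)
          rw [hkm] at this; exact Bool.false_ne_true this
        · have eb : pvMin2 b k = b := by simp [pvMin2, Bool.of_not_eq_true hlt]
          exact hmin b (by rw [eb]; exact List.mem_cons_self)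
      · rcases List.mem_cons.mp hy with hyk | hy
        · -- y = k
          rw [hyk]
          by_cases hlt : pvLt3 k b = true
          · have ek : pvMin2 b k = k := by simp [pvMin2, hlt]
            exact hmin k (by rw [ek]; exact List.mem_cons_self)
          · have eb : pvMin2 b k = b := by simp [pvMin2, Bool.of_not_eq_true hlt]
            have hbm : pvLt3 b m0 = false :=
              hmin b (by rw [eb]; exact List.mem_cons_self)
            by_contra hc
            have hkm := Bool.of_not_eq_false hc
            by_cases hbk : pvLt3 b k = true
            · have := pvLt3_trans hbk hkm
              rw [hbm] at this; exact Bool.false_ne_true this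
            · have hbe : b = k := pvLt3_antisymm (Bool.of_not_eq_true hbk) (Bool.of_not_eq_true hlt)
              rw [← hbe, hbm] at hkm; exact Bool.false_ne_true hkm
        · exact hmin y (List.mem_cons_of_mem _ hy)

theorem pvFoldl_step_some (ks : List (Int × Int × String)) :
    ∀ b, ks.foldl pvStep (some b) = some (ks.foldl pvMin2 b) := by
  induction ks with
  | nil => intro b; rfl
  | cons k ks ih =>
    intro b
    show ks.foldl pvStep (pvStep (some b) k) = _
    have : pvStep (some b) k = some (pvMin2 b k) := by
      simp only [pvStep, pvMin2]; split <;> rfl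
    rw [this, ih, List.foldl_cons]

-- The link: on a nonempty key list, head of the insertion sort = the running minimum.
theorem pvCore {ks : List (Int × Int × String)} (h : ks ≠ []) :
    ∃ m t, pvIsort ks = m :: t ∧ ks.foldl pvStep none = some m := by
  obtain ⟨m, t, hsort, hmin⟩ := pvIsort_head _ h
  cases ks with
  | nil => exact absurd rfl h
  | cons k ks' =>
    refine ⟨m, t, hsort, ?_⟩
    show ks'.foldl pvStep (pvStep none k) = some m
    have : pvStep none k = some k := rfl
    rw [this, pvFoldl_step_some]
    exact congrArg some (pvIsMin_unique (pvFoldlMin2_isMin ks' k) hmin)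

-- A's filtered-order build = map of filter
theorem pvBuild_filtered (used : List Int) (qn : List (Int × String)) :
    ∀ acc, qn.foldl (fun acc pt => if used.contains pt.1 then acc else acc ++ [pvKey pt]) acc
      = acc ++ (qn.filter (fun pt => !used.contains pt.1)).map pvKey := by
  induction qn with
  | nil => intro acc; simp
  | cons pt qn ih =>
    intro acc
    by_cases hc : used.contains pt.1 = true
    · rw [List.foldl_cons, if_pos hc, ih, List.filter_cons, if_neg (by rw [hc]; simp)]
    · have hb : used.contains pt.1 = false := Bool.of_not_eq_true hc
      rw [List.foldl_cons, if_neg (by rw [hb]; simp), ih, List.filter_cons, if_pos (by rw [hb]; rfl), List.map_cons]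
      simp

theorem pvBuild_all (qn : List (Int × String)) :
    ∀ acc, qn.foldl (fun acc pt => acc ++ [pvKey pt]) acc = acc ++ qn.map pvKey := by
  induction qn with
  | nil => intro acc; simp
  | cons pt qn ih => intro acc; simp [List.foldl_cons, ih]

-- B's filtered fold = fold over map of filter
theorem pvFold_filtered (used : List Int) (qn : List (Int × String)) :
    ∀ b, qn.foldl (fun best pt => if used.contains pt.1 then best else pvStep best (pvKey pt)) b
      = ((qn.filter (fun pt => !used.contains pt.1)).map pvKey).foldl pvStep b := by
  induction qn with
  | nil => intro b; simp
  | cons pt qn ih =>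
    intro b
    by_cases hc : used.contains pt.1 = true
    · rw [List.foldl_cons, if_pos hc, ih, List.filter_cons, if_neg (by rw [hc]; simp)]
    · have hb : used.contains pt.1 = false := Bool.of_not_eq_true hc
      rw [List.foldl_cons, if_neg (by rw [hb]; simp), ih, List.filter_cons, if_pos (by rw [hb]; rfl), List.map_cons, List.foldl_cons]

-- ===== VERDICT (by name: the statement is the Claim_ definition above) =====
theorem choose_quant_pos_spec : Claim_equal_choose_quant_pos := by
  intro qn dom used _ hpre
  simp only [Spec_choose_quant_pos, choose_quant_pos, choose_quant_pos_alt]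
  rw [pvBuild_filtered used qn [], pvFold_filtered used qn none, List.nil_append]
  by_cases hFe : (qn.filter (fun pt => !used.contains pt.1)).map pvKey = []
  · rw [hFe, if_pos rfl, pvBuild_all qn [], List.nil_append]
    simp only [List.foldl_nil]
    have hne : qn.map pvKey ≠ [] := fun h => hpre (List.map_eq_nil_iff.mp h)
    obtain ⟨m, t, hs, hf⟩ := pvCore hne
    have hfb : qn.foldl (fun b pt => pvStep b (pvKey pt)) none = some m := by
      rw [← hf, List.foldl_map]
    rw [hs, hfb]
  · rw [if_neg hFe]
    obtain ⟨m, t, hs, hf⟩ := pvCore hFe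
    rw [hs, hf]
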